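-- pv_equiv track=rewrite | github.com/itbolt/liba_space-challenge | part1_resume_customizer/jd_to_resume.py | filter_bullets_by_skills
-- ===== SOURCE A (Python) =====
-- def filter_bullets_by_skills(lines, skills):
--     skill_set = set(skills)
--     matched = []
--     others = []
--     for ln in lines:
--         ln_l = ln.lower()
--         if any(s in ln_l for s in skill_set):
--             matched.append(ln)
--         else:
--             others.append(ln)
--     return matched, others
-- ===== SOURCE B (Python) =====
-- def filter_bullets_by_skills(lines, skills):
--     def relevant(ln):
--         low = ln.lower()
--         return any(s in low for s in skills)
--     matched = [ln for ln in lines if relevant(ln)]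
--     others = [ln for ln in lines if not relevant(ln)]
--     return matched, others
-- ===== Notes on version B (the rewrite author's own statement) =====
-- stated objective: simpler
-- what changed: A's single accumulator loop appending to two lists (after deduplicating skills into a set) is replaced by a named predicate and two plain filter comprehensions over the skills list directly.
import Mathlib
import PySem

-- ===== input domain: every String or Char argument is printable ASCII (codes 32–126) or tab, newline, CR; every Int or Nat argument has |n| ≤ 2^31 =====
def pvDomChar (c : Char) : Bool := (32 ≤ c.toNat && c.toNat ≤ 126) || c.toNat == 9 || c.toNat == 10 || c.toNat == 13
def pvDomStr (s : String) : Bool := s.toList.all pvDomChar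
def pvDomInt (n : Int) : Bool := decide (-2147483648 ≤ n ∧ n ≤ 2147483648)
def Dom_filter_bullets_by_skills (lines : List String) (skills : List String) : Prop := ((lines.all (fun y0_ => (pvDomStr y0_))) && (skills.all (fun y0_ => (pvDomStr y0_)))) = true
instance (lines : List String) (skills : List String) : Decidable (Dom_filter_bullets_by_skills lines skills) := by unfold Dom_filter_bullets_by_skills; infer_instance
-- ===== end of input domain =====

-- B replaces A's one-pass accumulator loop over a deduplicated skill set by a named
-- relevance predicate and two filter comprehensions over the skills list (simpler decomposition).

-- ===== PORT A =====
def filter_bullets_by_skills (lines : List String) (skills : List String) : List String × List String :=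
  let skill_set : PySem.Set String := PySem.Set.ofList skills
  lines.foldl
    (fun acc ln =>
      let ln_l := PySem.Str.lower ln
      if skill_set.any (fun s => PySem.Str.isIn s ln_l) then (acc.1 ++ [ln], acc.2)
      else (acc.1, acc.2 ++ [ln]))
    ([], [])

-- ===== PORT B =====
def pvRelevant (skills : List String) (ln : String) : Bool :=
  let low := PySem.Str.lower ln
  skills.any (fun s => PySem.Str.isIn s low)

def filter_bullets_by_skills_alt (lines : List String) (skills : List String) : List String × List String :=
  (lines.filter (fun ln => pvRelevant skills ln),
   lines.filter (fun ln => !pvRelevant skills ln))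

-- ===== PRECONDITION & SPEC =====
def Spec_filter_bullets_by_skills (lines : List String) (skills : List String) (out : List String × List String) : Prop := out = filter_bullets_by_skills_alt lines skills
instance (lines : List String) (skills : List String) (out : List String × List String) : Decidable (Spec_filter_bullets_by_skills lines skills out) := by unfold Spec_filter_bullets_by_skills; infer_instance

-- ===== CLAIM (what is proved, stated in full; the proofs are below) =====
def Claim_equal_filter_bullets_by_skills : Prop := ∀ (lines : List String) (skills : List String), Dom_filter_bullets_by_skills lines skills → Spec_filter_bullets_by_skills lines skills (filter_bullets_by_skills lines skills)

-- ===== LEMMAS AND PROOFS =====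

-- A's per-line test over the deduplicated set equals B's test over the skills list
lemma pred_eq (skills : List String) (ln : String) :
    (PySem.Set.ofList skills).any (fun s => PySem.Str.isIn s (PySem.Str.lower ln))
      = pvRelevant skills ln := by
  rw [Bool.eq_iff_iff]
  simp [pvRelevant, List.any_eq_true, PySem.Set.mem_ofList]

-- ===== VERDICT (by name: the statement is the Claim_ definition above) =====
theorem filter_bullets_by_skills_spec : Claim_equal_filter_bullets_by_skills := by
  intro lines skills _
  unfold Spec_filter_bullets_by_skills filter_bullets_by_skills filter_bullets_by_skills_alt
  dsimp only
  have hstep : ∀ (acc : List String × List String) (ln : String), ln ∈ lines →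
      (fun (acc : List String × List String) (ln : String) =>
        if (PySem.Set.ofList skills).any (fun s => PySem.Str.isIn s (PySem.Str.lower ln)) then (acc.1 ++ [ln], acc.2)
        else (acc.1, acc.2 ++ [ln])) acc ln
      = ((fun a ln => if pvRelevant skills ln then a ++ [ln] else a) acc.1 ln,
         (fun a ln => if !pvRelevant skills ln then a ++ [ln] else a) acc.2 ln) := by
    intro acc ln _
    simp only [pred_eq]
    by_cases h : pvRelevant skills ln <;> simp [h]
  rw [PySem.List.foldl_congr_mem _ _ _ _ hstep,
    PySem.List.foldl_prod_mk (f := fun a ln => if pvRelevant skills ln then a ++ [ln] else a)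
      (g := fun a ln => if !pvRelevant skills ln then a ++ [ln] else a),
    PySem.List.foldl_append_if_eq_filter, PySem.List.foldl_append_if_eq_filter]
  simp
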